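-- pv_equiv track=rewrite | github.com/mtyszler/advent-of-code-2023 | src/functions_day_14.py | to_east
-- ===== SOURCE A (Python) =====
-- def to_east(patterns: list[list[str]]) -> list[list[str]]:
--     spinned = list(map(list, zip(*patterns)))
--
--     r_spinned = []
--     for x in spinned:
--         x.reverse()
--         r_spinned.append(x)
--
--     new_r_spinned = []
--     for r in range(len(r_spinned) - 1, -1, -1):
--         new_r_spinned.append(r_spinned[r])
--
--     return new_r_spinned
-- ===== SOURCE B (Python) =====
-- def to_east(patterns: list[list[str]]) -> list[list[str]]:
--     if not patterns:
--         return []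
--     R = len(patterns)
--     C = min(len(row) for row in patterns)
--     return [[patterns[R - 1 - j][C - 1 - k] for j in range(R)] for k in range(C)]
-- ===== Notes on version B (the rewrite author's own statement) =====
-- stated objective: simpler
-- what changed: B computes each output cell directly by index arithmetic (out[k][j] = patterns[R-1-j][C-1-k], with C the shortest row length mirroring zip's truncation) in one nested comprehension, instead of building a transposed copy, reversing each row in place, and reversing the outer list.
import Mathlib
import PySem

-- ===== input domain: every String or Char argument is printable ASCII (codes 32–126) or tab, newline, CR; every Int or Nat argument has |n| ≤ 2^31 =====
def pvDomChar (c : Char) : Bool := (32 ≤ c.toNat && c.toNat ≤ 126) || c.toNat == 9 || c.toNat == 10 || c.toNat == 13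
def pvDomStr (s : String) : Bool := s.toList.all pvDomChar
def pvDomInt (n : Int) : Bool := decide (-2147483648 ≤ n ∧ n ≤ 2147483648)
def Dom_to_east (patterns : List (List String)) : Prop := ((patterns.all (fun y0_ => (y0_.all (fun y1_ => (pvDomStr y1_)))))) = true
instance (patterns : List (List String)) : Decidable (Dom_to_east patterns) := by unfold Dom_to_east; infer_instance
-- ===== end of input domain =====

-- B replaces A's transpose + per-row reverse + outer reverse by one direct index comprehension (simpler decomposition; return-value equivalence — A builds fresh lists, no shared mutation is observable).

-- ===== PORT A =====
-- zip(*patterns): repeatedly take heads while every row is nonempty (Python's zip truncates at the shortest row)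
def pvZipStar (rows : List (List String)) : List (List String) :=
  if h : rows = [] ∨ rows.any (fun r => r.isEmpty) then []
  else (rows.map (fun r => r.headD "")) :: pvZipStar (rows.map List.tail)
termination_by (rows.headD []).length
decreasing_by
  rw [not_or] at h
  obtain ⟨h1, h2⟩ := h
  cases rows with
  | nil => exact absurd rfl h1
  | cons r rs =>
    have hr : ¬ r.isEmpty = true := by
      intro hc
      exact h2 (by simp [List.any_cons, hc])
    cases r with
    | nil => simp at hr
    | cons a t => simp

def to_east (patterns : List (List String)) : List (List String) :=
  let spinned := pvZipStar patterns
  let r_spinned := spinned.foldl (fun acc x => acc ++ [x.reverse]) []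
  let new_r_spinned := (PySem.List.pyRange ((r_spinned.length : Int) - 1) (-1) (-1)).foldl
      (fun acc r => acc ++ [PySem.List.pyGetD r_spinned r []]) []
  new_r_spinned

-- ===== PORT B =====
def to_east_alt (patterns : List (List String)) : List (List String) :=
  if patterns = [] then []
  else
    let R := patterns.length
    let C := (PySem.List.min? (patterns.map (fun row => row.length)) (fun x => x)).getD 0
    (List.range C).map (fun k => (List.range R).map (fun j =>
      (patterns.getD (R - 1 - j) []).getD (C - 1 - k) ""))

-- ===== PRECONDITION & SPEC =====
def Spec_to_east (patterns : List (List String)) (out : List (List String)) : Prop := out = to_east_alt patterns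
instance (patterns : List (List String)) (out : List (List String)) : Decidable (Spec_to_east patterns out) := by unfold Spec_to_east; infer_instance

-- ===== CLAIM (what is proved, stated in full; the proofs are below) =====
def Claim_equal_to_east : Prop := ∀ (patterns : List (List String)), Dom_to_east patterns → Spec_to_east patterns (to_east patterns)

-- ===== LEMMAS AND PROOFS =====

-- shortest-row length (0 for the empty grid), matching B's C
def pvC (rows : List (List String)) : Nat :=
  (PySem.List.min? (rows.map (fun r => r.length)) (fun x => x)).getD 0

lemma pvC_of_bad (rows : List (List String))
    (h : rows = [] ∨ rows.any (fun r => r.isEmpty) = true) : pvC rows = 0 := by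
  rcases h with h | h
  · subst h; simp [pvC, PySem.List.min?]
  · rw [List.any_eq_true] at h
    obtain ⟨r, hr, he⟩ := h
    have h0 : (0 : Nat) ∈ rows.map (fun r => r.length) := by
      refine List.mem_map.2 ⟨r, hr, ?_⟩
      cases r
      · rfl
      · simp at he
    unfold pvC
    cases hmin : PySem.List.min? (rows.map (fun r => r.length)) (fun x => x) with
    | none => rfl
    | some m =>
      have := PySem.List.min?_isMin hmin 0 h0
      simp at this ⊢
      omega

lemma pvC_succ (rows : List (List String)) (h1 : rows ≠ [])
    (h2 : ¬ rows.any (fun r => r.isEmpty) = true) :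
    pvC rows = pvC (rows.map List.tail) + 1 := by
  have hlen : (rows.map List.tail).map (fun r => r.length)
      = (rows.map (fun r => r.length)).map (fun x => x - 1) := by
    simp [List.map_map, Function.comp_def]
  have hpos : ∀ x ∈ rows.map (fun r => r.length), 1 ≤ x := by
    intro x hx
    obtain ⟨r, hr, hrx⟩ := List.mem_map.1 hx
    cases r with
    | nil => exact absurd (List.any_eq_true.2 ⟨[], hr, rfl⟩) h2
    | cons a t => rw [← hrx]; simp
  cases hmin : PySem.List.min? (rows.map (fun r => r.length)) (fun x => x) with
  | none =>
    rw [PySem.List.min?_eq_none_iff] at hmin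
    simp at hmin
    exact absurd hmin h1
  | some m =>
    have hmem := PySem.List.min?_mem hmin
    have hle := PySem.List.min?_isMin hmin
    have hm1 : 1 ≤ m := hpos m hmem
    cases hmin' : PySem.List.min? ((rows.map List.tail).map (fun r => r.length)) (fun x => x) with
    | none =>
      rw [PySem.List.min?_eq_none_iff] at hmin'
      simp at hmin'
      exact absurd hmin' h1
    | some m' =>
      have hmem' := PySem.List.min?_mem hmin'
      have hle' := PySem.List.min?_isMin hmin'
      rw [hlen] at hmem' hle'
      -- m' = m - 1 by antisymmetry
      have h1' : m' ≤ m - 1 := by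
        have := hle' (m - 1) (List.mem_map.2 ⟨m, hmem, rfl⟩)
        simpa using this
      have h2' : m - 1 ≤ m' := by
        obtain ⟨x, hx, hxm⟩ := List.mem_map.1 hmem'
        have := hle x hx
        simp at this
        omega
      unfold pvC
      rw [hmin, hmin']
      simp
      omega

lemma getD_zero_headD (l : List String) (d : String) : l.getD 0 d = l.headD d := by
  cases l <;> simp

lemma getD_succ_tail (l : List String) (c : Nat) (d : String) :
    l.getD (c + 1) d = l.tail.getD c d := by
  cases l <;> simp

lemma pvC_le (rows : List (List String)) (r : List String) (hr : r ∈ rows) :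
    pvC rows ≤ r.length := by
  cases hmin : PySem.List.min? (rows.map (fun x => x.length)) (fun x => x) with
  | none =>
    rw [PySem.List.min?_eq_none_iff] at hmin
    simp at hmin
    subst hmin
    simp at hr
  | some m =>
    have := PySem.List.min?_isMin hmin r.length (List.mem_map.2 ⟨r, hr, rfl⟩)
    simp only [pvC, hmin, Option.getD_some]
    simpa using this

lemma zipStar_eq (rows : List (List String)) :
    pvZipStar rows = (List.range (pvC rows)).map (fun c => rows.map (fun r => r.getD c "")) := by
  induction rows using pvZipStar.induct with
  | case1 rows h =>
    rw [pvZipStar, dif_pos h, pvC_of_bad rows h]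
    simp
  | case2 rows h ih =>
    rw [not_or] at h
    obtain ⟨h1, h2⟩ := h
    rw [pvZipStar, dif_neg (by rw [not_or]; exact ⟨h1, h2⟩)]
    have ih' : pvZipStar (rows.map List.tail)
        = (List.range (pvC (rows.map List.tail))).map
            (fun c => (rows.map List.tail).map (fun r => r.getD c "")) := by
      simpa using ih
    rw [pvC_succ rows h1 h2, List.range_succ_eq_map, List.map_cons, ih']
    congr 1
    · apply List.map_congr_left
      intro r _
      exact (getD_zero_headD r "").symm
    · rw [List.map_map]
      apply List.map_congr_left
      intro c _
      rw [List.map_map]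
      apply List.map_congr_left
      intro r _
      simp only [Function.comp_apply, Nat.succ_eq_add_one]
      exact (getD_succ_tail r c "").symm

theorem to_east_spec : Claim_equal_to_east := by
  intro patterns _
  unfold Spec_to_east
  by_cases hp : patterns = []
  · subst hp
    simp [to_east, to_east_alt, pvZipStar, PySem.List.pyRange_neg_one_eq_nil]
  · have hC : (PySem.List.min? (patterns.map (fun row => row.length)) (fun x => x)).getD 0
        = pvC patterns := rfl
    have hR : 0 < patterns.length := List.length_pos_iff.2 hp
    unfold to_east to_east_alt
    rw [if_neg hp]
    simp only [hC, zipStar_eq, PySem.List.foldl_append_singleton_eq_map, List.nil_append, List.length_map, List.length_range]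
    have htn : (((pvC patterns : Int) - 1) - (-1)).toNat = pvC patterns := by omega
    rw [PySem.List.pyRange_neg_one, htn, List.map_map]
    apply List.map_congr_left
    intro k hk
    rw [List.mem_range] at hk
    set C := pvC patterns with hCdef
    have hcast : ((C : Int) - 1 - (k : Int)) = ((C - 1 - k : Nat) : Int) := by omega
    simp only [Function.comp_apply]
    rw [hcast, PySem.List.pyGetD_natCast]
    have hlt : C - 1 - k < (((List.range C).map (fun c => patterns.map (fun r => r.getD c ""))).map
        List.reverse).length := by simp; omega
    rw [List.getD_eq_getElem _ _ hlt]
    simp only [List.getElem_map, List.getElem_range]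
    apply List.ext_getElem
    · simp
    · intro j hj hj'
      simp only [List.length_reverse, List.length_map] at hj
      rw [List.getElem_reverse]
      simp only [List.getElem_map, List.length_map, List.getElem_range]
      have hrow : C ≤ (patterns[patterns.length - 1 - j]'(by omega)).length :=
        pvC_le patterns _ (List.getElem_mem _)
      rw [List.getD_eq_getElem patterns _ (by omega),
        List.getD_eq_getElem _ _ (by omega)]
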